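-- pv_equiv track=rewrite | github.com/boarss/NurseAda | services/cdss/app/diagnosis_engine.py | _severity_from_indices
-- ===== SOURCE A (Python) =====
-- SEVERITY_ORDER = {"emergency": 4, "high": 3, "medium": 2, "low": 1}
--
-- TRIAGE_RULES = [
--     (r"\b(dka|diabetic ketoacidosis|ketoacidosis)\b", "emergency", "E10.10", "DKA"),
--     (r"\b(fruity breath|kussmaul|ketones.*(?:high|large|moderate)|high ketones|large ketones)\b", "emergency", "E10.10", "DKA symptoms"),
--     (r"\b(chest pain|can't breathe|unconscious|stroke|severe bleed|overdose|suicide|convulsion|seizure)\b", "emergency", "R00", "Emergency symptoms"),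
--     (r"\b(severe pain|difficulty breathing|shortness of breath)\b", "high", "R06", "Respiratory/cardiac concern"),
--     (r"\b(high fever|fever over 39|fever 39)\b", "high", "R50.9", "Fever (high)"),
--     (r"\b(severe headache|worst headache|sudden headache)\b", "high", "R51", "Severe headache"),
--     (r"\b(vomiting blood|coughing blood|blood in stool)\b", "high", "R58", "Bleeding"),
--     (r"\b(ketones?|blood ketone|urine ketone)\b", "high", "R82.2", "Ketones"),
--     (r"\b(diabetes.*(?:vomit|vomiting|nausea)|high blood sugar.*(?:sick|ill|vomit))\b", "high", "E11", "Diabetes + illness"),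
--     (r"\b(fever|temperature)\b", "medium", "R50.9", "Fever"),
--     (r"\b(cough| coughing)\b", "medium", "R05", "Cough"),
--     (r"\b(headache|head ache)\b", "medium", "R51", "Headache"),
--     (r"\b(diarrhea|diarrhoea|loose stool)\b", "medium", "R19.7", "Diarrhea"),
--     (r"\b(pain|hurt|aching)\b", "medium", "R52", "Pain"),
--     (r"\b(tired|fatigue|weak)\b", "low", "R53", "Tiredness"),
-- ]
--
-- def _severity_from_indices(indices: list[int]) -> str:
--     if not indices:
--         return "low"
--     max_score = 0
--     max_severity = "low"
--     for idx in indices: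
--         severity = TRIAGE_RULES[idx][1]
--         score = SEVERITY_ORDER.get(severity, 0)
--         if score >= max_score:
--             max_score = score
--             max_severity = severity
--     return max_severity
-- ===== SOURCE B (Python) =====
-- # Severity column of TRIAGE_RULES, flattened: the severity name of rule i.
-- # (Only this column matters for triage ranking; the regex/ICD columns are unused here.)
-- _RULE_SEVERITY = [
--     "emergency", "emergency", "emergency",
--     "high", "high", "high", "high", "high", "high",
--     "medium", "medium", "medium", "medium", "medium",
--     "low",
-- ]
--
--
-- def _severity_from_indices(indices: list[int]) -> str:
--     for name in ("emergency", "high", "medium", "low"):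
--         if any(_RULE_SEVERITY[i] == name for i in indices):
--             return name
--     return "low"
-- ===== Notes on version B (the rewrite author's own statement) =====
-- stated objective: simpler
-- what changed: B drops the score dictionary and the running (max_score, max_severity) accumulator: it keeps only the flattened severity column of the rule table and loops over the four severity names from highest to lowest, returning the first name some index maps to.
import Mathlib
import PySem

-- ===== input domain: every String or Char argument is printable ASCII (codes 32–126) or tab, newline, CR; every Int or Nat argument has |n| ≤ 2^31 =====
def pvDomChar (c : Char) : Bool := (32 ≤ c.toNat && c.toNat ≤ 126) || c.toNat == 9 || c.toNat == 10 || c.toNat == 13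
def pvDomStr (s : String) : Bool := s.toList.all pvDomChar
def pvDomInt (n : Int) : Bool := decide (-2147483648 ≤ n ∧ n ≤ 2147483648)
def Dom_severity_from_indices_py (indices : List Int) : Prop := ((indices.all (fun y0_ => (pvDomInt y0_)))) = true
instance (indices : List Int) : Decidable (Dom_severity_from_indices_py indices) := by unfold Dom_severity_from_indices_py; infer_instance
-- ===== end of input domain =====

-- B replaces A's score dictionary and running (max_score, max_severity) accumulator by the
-- flattened severity column of the rule table and an outer loop over the four severity
-- names in descending rank, returning the first name some index maps to (simpler).

-- ===== PORT A =====
-- module constants used by A: TRIAGE_RULES and SEVERITY_ORDER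
def TRIAGE_RULES : List (String × String × String × String) := [
  ("\\b(dka|diabetic ketoacidosis|ketoacidosis)\\b", "emergency", "E10.10", "DKA"),
  ("\\b(fruity breath|kussmaul|ketones.*(?:high|large|moderate)|high ketones|large ketones)\\b", "emergency", "E10.10", "DKA symptoms"),
  ("\\b(chest pain|can't breathe|unconscious|stroke|severe bleed|overdose|suicide|convulsion|seizure)\\b", "emergency", "R00", "Emergency symptoms"),
  ("\\b(severe pain|difficulty breathing|shortness of breath)\\b", "high", "R06", "Respiratory/cardiac concern"),
  ("\\b(high fever|fever over 39|fever 39)\\b", "high", "R50.9", "Fever (high)"),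
  ("\\b(severe headache|worst headache|sudden headache)\\b", "high", "R51", "Severe headache"),
  ("\\b(vomiting blood|coughing blood|blood in stool)\\b", "high", "R58", "Bleeding"),
  ("\\b(ketones?|blood ketone|urine ketone)\\b", "high", "R82.2", "Ketones"),
  ("\\b(diabetes.*(?:vomit|vomiting|nausea)|high blood sugar.*(?:sick|ill|vomit))\\b", "high", "E11", "Diabetes + illness"),
  ("\\b(fever|temperature)\\b", "medium", "R50.9", "Fever"),
  ("\\b(cough| coughing)\\b", "medium", "R05", "Cough"),
  ("\\b(headache|head ache)\\b", "medium", "R51", "Headache"),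
  ("\\b(diarrhea|diarrhoea|loose stool)\\b", "medium", "R19.7", "Diarrhea"),
  ("\\b(pain|hurt|aching)\\b", "medium", "R52", "Pain"),
  ("\\b(tired|fatigue|weak)\\b", "low", "R53", "Tiredness")]

-- SEVERITY_ORDER as a PySem.Dict; SEVERITY_ORDER.get(s, 0)
def SEVERITY_ORDER : PySem.Dict String Int :=
  PySem.Dict.ofList [("emergency", 4), ("high", 3), ("medium", 2), ("low", 1)]

-- the for-loop of A over (max_score, max_severity); pyGet? none = IndexError (excluded by Pre_)
def sevLoopA : List Int → Int × String → Int × String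
  | [], st => st
  | idx :: rest, (max_score, max_severity) =>
    match PySem.List.pyGet? TRIAGE_RULES idx with
    | none => (max_score, max_severity)   -- Python raises IndexError here; outside Pre_
    | some rule =>
      let severity := rule.2.1
      let score := PySem.Dict.getD SEVERITY_ORDER severity 0
      if score ≥ max_score then sevLoopA rest (score, severity)
      else sevLoopA rest (max_score, max_severity)

def severity_from_indices_py (indices : List Int) : String :=
  if indices = [] then "low"
  else (sevLoopA indices (0, "low")).2

-- ===== PORT B =====
-- B's module constant: the flattened severity column of the rule table (_RULE_SEVERITY in Source B)
def RULE_SEVERITY : List String :=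
  ["emergency", "emergency", "emergency",
   "high", "high", "high", "high", "high", "high",
   "medium", "medium", "medium", "medium", "medium",
   "low"]

-- inner generator test: _RULE_SEVERITY[i] == name (IndexError outside Pre_)
def sevMatchesB (i : Int) (name : String) : Bool :=
  match PySem.List.pyGet? RULE_SEVERITY i with
  | none => false   -- Python raises IndexError here; outside Pre_
  | some s => s == name

def severity_from_indices_py_alt (indices : List Int) : String :=
  match ["emergency", "high", "medium", "low"].find?
      (fun name => indices.any (fun i => sevMatchesB i name)) with
  | some name => name
  | none => "low"

-- ===== PRECONDITION & SPEC =====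
-- Pre_ excludes exactly the out-of-range rule indices, on which Python A (and B) raise IndexError.
def Pre_severity_from_indices_py (indices : List Int) : Prop :=
  ∀ idx ∈ indices, -15 ≤ idx ∧ idx < 15
instance (indices : List Int) : Decidable (Pre_severity_from_indices_py indices) := by
  unfold Pre_severity_from_indices_py; infer_instance

def pvWitness_severity_from_indices_py : List Int := [0, 9, -1, 14, 3]

def Spec_severity_from_indices_py (indices : List Int) (out : String) : Prop := out = severity_from_indices_py_alt indices
instance (indices : List Int) (out : String) : Decidable (Spec_severity_from_indices_py indices out) := by unfold Spec_severity_from_indices_py; infer_instance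

-- ===== CLAIM (what is proved, stated in full; the proofs are below) =====
def Claim_equal_severity_from_indices_py : Prop := ∀ (indices : List Int), Dom_severity_from_indices_py indices → Pre_severity_from_indices_py indices → Spec_severity_from_indices_py indices (severity_from_indices_py indices)

-- ===== LEMMAS AND PROOFS =====

-- abstract score/name machinery (about A's table)
def sevScore (i : Int) : Int :=
  match PySem.List.pyGet? TRIAGE_RULES i with
  | none => 0
  | some rule => PySem.Dict.getD SEVERITY_ORDER rule.2.1 0

def sevName (i : Int) : String :=
  match PySem.List.pyGet? TRIAGE_RULES i with
  | none => ""
  | some rule => rule.2.1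

def nameOf (k : Int) : String :=
  if k = 4 then "emergency" else if k = 3 then "high" else if k = 2 then "medium" else "low"

def maxScore (l : List Int) (s : Int) : Int := l.foldl (fun m i => max m (sevScore i)) s

-- per-index characterisation, by exhausting the 30 valid indices
theorem sev_char (i : Int) (h1 : -15 ≤ i) (h2 : i < 15) :
    sevName i = nameOf (sevScore i) ∧ 1 ≤ sevScore i ∧ sevScore i ≤ 4 := by
  interval_cases i <;> decide

theorem pyGet_some (i : Int) (h1 : -15 ≤ i) (h2 : i < 15) :
    ∃ r, PySem.List.pyGet? TRIAGE_RULES i = some r := by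
  rcases hr : PySem.List.pyGet? TRIAGE_RULES i with _ | r
  · exfalso; revert hr; interval_cases i <;> decide
  · exact ⟨r, rfl⟩

-- B's column agrees with the severity column of A's table on every valid index
theorem column_eq (i : Int) (h1 : -15 ≤ i) (h2 : i < 15) :
    PySem.List.pyGet? RULE_SEVERITY i = some (sevName i) := by
  interval_cases i <;> decide

theorem sevMatchesB_char (i : Int) (name : String) (h1 : -15 ≤ i) (h2 : i < 15) :
    sevMatchesB i name = (sevName i == name) := by
  simp [sevMatchesB, column_eq i h1 h2]

-- A's loop computes the name of the running maximum
theorem sevLoopA_eq (l : List Int) : ∀ (s : Int) (v : String),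
    (∀ i ∈ l, -15 ≤ i ∧ i < 15) → 1 ≤ s → v = nameOf s →
    (sevLoopA l (s, v)).2 = nameOf (maxScore l s) := by
  induction l with
  | nil => intro s v _ _ hv; simpa [sevLoopA, maxScore]
  | cons i rest ih =>
    intro s v hvalid hs hv
    have hi := hvalid i (by simp)
    obtain ⟨hn, hlo, hhi⟩ := sev_char i hi.1 hi.2
    have hrest : ∀ j ∈ rest, -15 ≤ j ∧ j < 15 := fun j hj => hvalid j (by simp [hj])
    obtain ⟨r, hr⟩ := pyGet_some i hi.1 hi.2
    have hscore : sevScore i = PySem.Dict.getD SEVERITY_ORDER r.2.1 0 := by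
      simp [sevScore, hr]
    have hname : sevName i = r.2.1 := by simp [sevName, hr]
    show (sevLoopA (i :: rest) (s, v)).2 = _
    rw [sevLoopA, hr]
    simp only [← hname]
    have hsc2 : SEVERITY_ORDER.getD (sevName i) 0 = sevScore i := by rw [hname]; exact hscore.symm
    simp only [hsc2]
    by_cases hc : sevScore i ≥ s
    · rw [if_pos hc]
      have : maxScore (i :: rest) s = maxScore rest (sevScore i) := by
        simp [maxScore, max_eq_right hc]
      rw [this]
      exact ih (sevScore i) (sevName i) hrest hlo hn
    · rw [if_neg hc]
      have : maxScore (i :: rest) s = maxScore rest s := by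
        simp [maxScore, max_eq_left (le_of_not_ge hc)]
      rw [this]
      exact ih s v hrest hs hv

-- bounds and attainment of the foldl max
theorem maxScore_le_init (l : List Int) : ∀ s : Int, s ≤ maxScore l s := by
  induction l with
  | nil => intro s; simp [maxScore]
  | cons i rest ih =>
    intro s
    have := ih (max s (sevScore i))
    calc s ≤ max s (sevScore i) := le_max_left _ _
      _ ≤ maxScore rest (max s (sevScore i)) := this
      _ = maxScore (i :: rest) s := by simp [maxScore]

theorem maxScore_ub (l : List Int) : ∀ s : Int, ∀ j ∈ l, sevScore j ≤ maxScore l s := by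
  induction l with
  | nil => intro _ j hj; simp at hj
  | cons i rest ih =>
    intro s j hj
    rcases List.mem_cons.mp hj with h | h
    · subst h
      have h1 : sevScore j ≤ max s (sevScore j) := le_max_right _ _
      have h2 := maxScore_le_init rest (max s (sevScore j))
      calc sevScore j ≤ max s (sevScore j) := h1
        _ ≤ maxScore rest (max s (sevScore j)) := h2
        _ = maxScore (j :: rest) s := by simp [maxScore]
    · have := ih (max s (sevScore i)) j h
      simpa [maxScore] using this

theorem maxScore_attained (l : List Int) : ∀ s : Int,
    maxScore l s = s ∨ ∃ j ∈ l, maxScore l s = sevScore j := by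
  induction l with
  | nil => intro s; left; simp [maxScore]
  | cons i rest ih =>
    intro s
    have hms : maxScore (i :: rest) s = maxScore rest (max s (sevScore i)) := by simp [maxScore]
    rcases ih (max s (sevScore i)) with h | ⟨j, hj, hje⟩
    · rcases max_cases s (sevScore i) with ⟨he, _⟩ | ⟨he, _⟩
      · left; rw [hms, h, he]
      · right; exact ⟨i, by simp, by rw [hms, h, he]⟩
    · right; exact ⟨j, by simp [hj], by rw [hms, hje]⟩

-- any-test characterised by the existence of an index with a given score
theorem any_eq_exists_score (l : List Int) (hvalid : ∀ i ∈ l, -15 ≤ i ∧ i < 15) (k : Int)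
    (hk1 : 1 ≤ k) (hk4 : k ≤ 4) :
    l.any (fun i => sevMatchesB i (nameOf k)) = decide (∃ j ∈ l, sevScore j = k) := by
  by_cases h : l.any (fun i => sevMatchesB i (nameOf k)) = true
  · rw [h]; symm; rw [decide_eq_true_iff]
    obtain ⟨j, hj, hjm⟩ := List.any_eq_true.mp h
    have hjv := hvalid j hj
    obtain ⟨hn, hlo, hhi⟩ := sev_char j hjv.1 hjv.2
    rw [sevMatchesB_char j _ hjv.1 hjv.2, hn] at hjm
    have heq : nameOf (sevScore j) = nameOf k := eq_of_beq hjm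
    refine ⟨j, hj, ?_⟩
    -- nameOf is injective on [1,4]
    have h1 : sevScore j = 1 ∨ sevScore j = 2 ∨ sevScore j = 3 ∨ sevScore j = 4 := by omega
    have h2 : k = 1 ∨ k = 2 ∨ k = 3 ∨ k = 4 := by omega
    rcases h1 with h|h|h|h <;> rcases h2 with g|g|g|g <;> simp_all [nameOf]
  · rw [Bool.eq_false_iff.mpr h]; symm; rw [decide_eq_false_iff_not]
    rintro ⟨j, hj, hjk⟩
    have hjv := hvalid j hj
    obtain ⟨hn, _, _⟩ := sev_char j hjv.1 hjv.2
    have hm : sevMatchesB j (nameOf k) = true := by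
      rw [sevMatchesB_char j _ hjv.1 hjv.2, hn, hjk]; simp
    exact h (List.any_eq_true.mpr ⟨j, hj, hm⟩)

-- B computes the name of the maximum score
theorem alt_eq_nameOf (l : List Int) (hvalid : ∀ i ∈ l, -15 ≤ i ∧ i < 15) (M : Int)
    (hM1 : 1 ≤ M) (hM4 : M ≤ 4)
    (hex : ∃ j ∈ l, sevScore j = M) (hub : ∀ j ∈ l, sevScore j ≤ M) :
    severity_from_indices_py_alt l = nameOf M := by
  have hany : ∀ k, 1 ≤ k → k ≤ 4 →
      l.any (fun i => sevMatchesB i (nameOf k)) = decide (∃ j ∈ l, sevScore j = k) :=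
    fun k hk1 hk4 => any_eq_exists_score l hvalid k hk1 hk4
  have hno : ∀ k, M < k → k ≤ 4 → l.any (fun i => sevMatchesB i (nameOf k)) = false := by
    intro k hk hk4
    rw [hany k (by omega) hk4, decide_eq_false_iff_not]
    rintro ⟨j, hj, hje⟩
    have := hub j hj; omega
  have hyes : l.any (fun i => sevMatchesB i (nameOf M)) = true := by
    rw [hany M hM1 hM4, decide_eq_true_iff]; exact hex
  have hMc : M = 1 ∨ M = 2 ∨ M = 3 ∨ M = 4 := by omega
  unfold severity_from_indices_py_alt
  rcases hMc with h|h|h|h <;> subst h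
  · rw [show nameOf 1 = "low" from rfl] at hyes ⊢
    simp only [List.find?]
    rw [show ("emergency" : String) = nameOf 4 from rfl] at *
    rw [hno 4 (by omega) (by omega)]
    rw [show ("high" : String) = nameOf 3 from rfl, hno 3 (by omega) (by omega)]
    rw [show ("medium" : String) = nameOf 2 from rfl, hno 2 (by omega) (by omega)]
    rw [hyes]
  · rw [show nameOf 2 = "medium" from rfl] at hyes ⊢
    simp only [List.find?]
    rw [show ("emergency" : String) = nameOf 4 from rfl, hno 4 (by omega) (by omega)]
    rw [show ("high" : String) = nameOf 3 from rfl, hno 3 (by omega) (by omega)]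
    rw [hyes]
  · rw [show nameOf 3 = "high" from rfl] at hyes ⊢
    simp only [List.find?]
    rw [show ("emergency" : String) = nameOf 4 from rfl, hno 4 (by omega) (by omega)]
    rw [hyes]
  · rw [show nameOf 4 = "emergency" from rfl] at hyes ⊢
    simp only [List.find?]
    rw [hyes]

-- ===== VERDICT (by name: the statement is the Claim_ definition above) =====
theorem severity_from_indices_py_spec : Claim_equal_severity_from_indices_py := by
  intro indices _ hpre
  unfold Spec_severity_from_indices_py
  match indices with
  | [] => decide
  | i :: rest =>
    have hvalid : ∀ j ∈ i :: rest, -15 ≤ j ∧ j < 15 := hpre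
    have hi := hvalid i (by simp)
    obtain ⟨hn, hlo, hhi⟩ := sev_char i hi.1 hi.2
    have hrest : ∀ j ∈ rest, -15 ≤ j ∧ j < 15 := fun j hj => hvalid j (by simp [hj])
    -- A's value
    obtain ⟨r, hr⟩ := pyGet_some i hi.1 hi.2
    have hA : severity_from_indices_py (i :: rest) = nameOf (maxScore rest (sevScore i)) := by
      unfold severity_from_indices_py
      rw [if_neg (by simp)]
      rw [sevLoopA, hr]
      have h0 : PySem.Dict.getD SEVERITY_ORDER r.2.1 0 = sevScore i := by simp [sevScore, hr]
      have h1 : r.2.1 = sevName i := by simp [sevName, hr]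
      rw [h1] at h0
      simp only [h1, h0]
      rw [if_pos (by omega)]
      exact sevLoopA_eq rest (sevScore i) (sevName i) hrest hlo hn
    rw [hA]
    -- B's value
    set M := maxScore rest (sevScore i) with hMdef
    have hMlo : sevScore i ≤ M := maxScore_le_init rest (sevScore i)
    have hub : ∀ j ∈ i :: rest, sevScore j ≤ M := by
      intro j hj
      rcases List.mem_cons.mp hj with h | h
      · subst h; exact hMlo
      · exact maxScore_ub rest (sevScore i) j h
    have hex : ∃ j ∈ i :: rest, sevScore j = M := by
      rcases maxScore_attained rest (sevScore i) with h | ⟨j, hj, hje⟩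
      · exact ⟨i, by simp, h.symm⟩
      · exact ⟨j, by simp [hj], hje.symm⟩
    have hM4 : M ≤ 4 := by
      obtain ⟨j, hj, hje⟩ := hex
      have := sev_char j (hvalid j hj).1 (hvalid j hj).2
      omega
    exact (alt_eq_nameOf (i :: rest) hvalid M (by omega) hM4 hex hub).symm
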